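-- pv_equiv track=rewrite | github.com/syyun13/python_coding_test | week2-hash-stack/lv3_path.py | solution
-- ===== SOURCE A (Python) =====
-- def solution(dirs):
--     answer = 0
--
--     walked = [[ {"U": False, "D": False, "R": False, "L": False} for col in range(11) ] for row in range(11)]
--     opposites = {"U": "D", "D": "U", "R": "L", "L": "R"}
--
--     path = { "U": [0, 1], "D": [0, -1], "R": [1, 0], "L": [-1, 0] }
--     x = 5
--     y = 5
--
--     for direction in dirs:
--         add_x, add_y = path[direction]
--         new_x = x + add_x
--         new_y = y + add_y
--
--         if 0 <= new_x <= 10 and 0 <= new_y <= 10: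
--             did_walk = walked[x][y][direction]
--             if not did_walk:
--                 walked[x][y][direction] = True
--                 opposite = opposites[direction]
--                 walked[new_x][new_y][opposite] = True
--                 answer += 1
--             x = new_x
--             y = new_y
--
--     return answer
-- ===== SOURCE B (Python) =====
-- def solution(dirs):
--     # stage 1: record the trajectory (positions actually visited, in order)
--     delta = {"U": (0, 1), "D": (0, -1), "R": (1, 0), "L": (-1, 0)}
--     pts = [(5, 5)]
--     x, y = 5, 5
--     for d in dirs:
--         dx, dy = delta[d]
--         nx, ny = x + dx, y + dy
--         if 0 <= nx <= 10 and 0 <= ny <= 10: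
--             pts.append((nx, ny))
--             x, y = nx, ny
--     # stage 2: count distinct undirected edges among consecutive trajectory points
--     return len({tuple(sorted(e)) for e in zip(pts, pts[1:])})
-- ===== Notes on version B (the rewrite author's own statement) =====
-- stated objective: alternative
-- what changed: B is a two-stage computation: it first records the full trajectory as a list of positions (no visited-marking at all during the walk), then counts distinct undirected edges by deduplicating the sorted consecutive point pairs of that trajectory; A instead maintains an 11x11 per-direction boolean grid with opposite-direction double marking and a running counter inside the walk loop.
import Mathlib
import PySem

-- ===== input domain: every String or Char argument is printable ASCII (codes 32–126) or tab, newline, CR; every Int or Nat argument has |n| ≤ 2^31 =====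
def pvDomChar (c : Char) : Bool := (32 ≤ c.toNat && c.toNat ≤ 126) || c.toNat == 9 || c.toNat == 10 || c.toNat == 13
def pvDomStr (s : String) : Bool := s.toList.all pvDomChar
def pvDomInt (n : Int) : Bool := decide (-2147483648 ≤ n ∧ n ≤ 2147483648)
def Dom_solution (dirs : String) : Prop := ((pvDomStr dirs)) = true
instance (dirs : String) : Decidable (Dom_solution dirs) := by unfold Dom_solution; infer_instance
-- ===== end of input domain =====

-- B records the trajectory first and counts distinct undirected consecutive-point
-- edges afterwards, instead of A's in-loop 11x11 per-direction boolean grid with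
-- opposite-direction double marking and running counter (objective: alternative).

-- ===== PORT A =====
-- path[direction]: the delta table (dict lookup; Pre_ guarantees the key exists)
def pvDeltaA (d : Char) : Int × Int :=
  if d = 'U' then (0, 1) else if d = 'D' then (0, -1)
  else if d = 'R' then (1, 0) else (-1, 0)

-- opposites[direction]
def pvOppA (d : Char) : Char :=
  if d = 'U' then 'D' else if d = 'D' then 'U' else if d = 'R' then 'L' else 'R'

-- the 11x11 array of {"U","D","R","L"}-keyed booleans, modelled as a function
-- (indices stay in 0..10, so the array reads/writes are exact)
def pvStepA (st : Int × (Int → Int → Char → Bool) × Int × Int) (direction : Char) :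
    Int × (Int → Int → Char → Bool) × Int × Int :=
  let (answer, walked, x, y) := st
  let (add_x, add_y) := pvDeltaA direction
  let new_x := x + add_x
  let new_y := y + add_y
  if 0 ≤ new_x ∧ new_x ≤ 10 ∧ 0 ≤ new_y ∧ new_y ≤ 10 then
    let did_walk := walked x y direction
    if did_walk then (answer, walked, new_x, new_y)
    else
      let w1 := fun a b c => if a = x ∧ b = y ∧ c = direction then true else walked a b c
      let w2 := fun a b c =>
        if a = new_x ∧ b = new_y ∧ c = pvOppA direction then true else w1 a b c
      (answer + 1, w2, new_x, new_y)
  else (answer, walked, x, y)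

def solution (dirs : String) : Int :=
  (dirs.toList.foldl pvStepA (0, (fun _ _ _ => false), 5, 5)).1

-- ===== PORT B =====
def pvDeltaB (d : Char) : Int × Int :=
  if d = 'U' then (0, 1) else if d = 'D' then (0, -1)
  else if d = 'R' then (1, 0) else (-1, 0)

-- stage-1 loop body: extend the trajectory list when the move stays in bounds
def pvStepB (st : List (Int × Int) × Int × Int) (d : Char) :
    List (Int × Int) × Int × Int :=
  let (pts, x, y) := st
  let (dx, dy) := pvDeltaB d
  let nx := x + dx
  let ny := y + dy
  if 0 ≤ nx ∧ nx ≤ 10 ∧ 0 ≤ ny ∧ ny ≤ 10 then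
    (pts ++ [(nx, ny)], nx, ny)
  else (pts, x, y)

-- tuple(sorted(e)) for a 2-element pair of int pairs: the lexicographically
-- smaller endpoint first
def pvCanon (a b : Int × Int) : (Int × Int) × (Int × Int) :=
  if a.1 < b.1 ∨ (a.1 = b.1 ∧ a.2 ≤ b.2) then (a, b) else (b, a)

-- stage 2, part 1: the canonical edges of consecutive points (zip(pts, pts[1:]))
def pvEdgesList (pts : List (Int × Int)) : List ((Int × Int) × (Int × Int)) :=
  (pts.zip pts.tail).map (fun e => pvCanon e.1 e.2)

def solution_alt (dirs : String) : Int :=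
  let st := dirs.toList.foldl pvStepB ([(5, 5)], 5, 5)
  ((PySem.Set.ofList (pvEdgesList st.1)).length : Int)

-- ===== PRECONDITION & SPEC =====
-- Pre_ excludes strings containing a character other than the four direction letters:
-- on those both A and B raise KeyError at the delta-table dict lookup.
def Pre_solution (dirs : String) : Prop :=
  (dirs.toList.all fun c => c == 'U' || c == 'D' || c == 'R' || c == 'L') = true
instance (dirs : String) : Decidable (Pre_solution dirs) := by
  unfold Pre_solution; infer_instance

def pvWitness_solution : String := "URD"

def Spec_solution (dirs : String) (out : Int) : Prop := out = solution_alt dirs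
instance (dirs : String) (out : Int) : Decidable (Spec_solution dirs out) := by
  unfold Spec_solution; infer_instance

-- ===== CLAIM (what is proved, stated in full; the proofs are below) =====
def Claim_equal_solution : Prop :=
  ∀ (dirs : String), Dom_solution dirs → Pre_solution dirs → Spec_solution dirs (solution dirs)

-- ===== LEMMAS AND PROOFS =====

-- proof-side helper: the edge SET of a trajectory, maintained incrementally
def pvStepE (st : PySem.Set ((Int × Int) × (Int × Int)) × Int × Int) (d : Char) :
    PySem.Set ((Int × Int) × (Int × Int)) × Int × Int :=
  let (edges, x, y) := st
  let (dx, dy) := pvDeltaB d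
  let nx := x + dx
  let ny := y + dy
  if 0 ≤ nx ∧ nx ≤ 10 ∧ 0 ≤ ny ∧ ny ≤ 10 then
    (PySem.Set.add edges (pvCanon (x, y) (nx, ny)), nx, ny)
  else (edges, x, y)

-- the invariant tying A's state to the incremental edge-set state
def pvInv (sa : Int × (Int → Int → Char → Bool) × Int × Int)
    (sb : PySem.Set ((Int × Int) × (Int × Int)) × Int × Int) : Prop :=
  sa.2.2.1 = sb.2.1 ∧ sa.2.2.2 = sb.2.2 ∧ sa.1 = (sb.1.length : Int) ∧
  ∀ (p : Int × Int) (d : Char), (d = 'U' ∨ d = 'D' ∨ d = 'R' ∨ d = 'L') →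
    (sa.2.1 p.1 p.2 d = true ↔
      pvCanon p (p.1 + (pvDeltaA d).1, p.2 + (pvDeltaA d).2) ∈ sb.1)

-- the invariant tying the trajectory-list state to the edge-set state
def pvInvB (sbl : List (Int × Int) × Int × Int)
    (sb : PySem.Set ((Int × Int) × (Int × Int)) × Int × Int) : Prop :=
  sbl.1.getLast? = some (sbl.2.1, sbl.2.2) ∧
  sb = (PySem.Set.ofList (pvEdgesList sbl.1), sbl.2.1, sbl.2.2)

theorem pvCanon_eq_iff (a b c d : Int × Int) (hab : a ≠ b) (hcd : c ≠ d) :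
    pvCanon a b = pvCanon c d ↔ (a = c ∧ b = d) ∨ (a = d ∧ b = c) := by
  obtain ⟨a1, a2⟩ := a; obtain ⟨b1, b2⟩ := b
  obtain ⟨c1, c2⟩ := c; obtain ⟨d1, d2⟩ := d
  simp only [pvCanon, ne_eq, Prod.mk.injEq, not_and] at *
  split_ifs <;> simp only [Prod.mk.injEq] <;> constructor <;> intro h <;> omega

theorem pvCanon_comm (a b : Int × Int) : pvCanon a b = pvCanon b a := by
  obtain ⟨a1, a2⟩ := a; obtain ⟨b1, b2⟩ := b
  simp only [pvCanon]
  split_ifs <;> simp only [Prod.mk.injEq] <;> omega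

theorem pvDelta_ne (d : Char) (h : d = 'U' ∨ d = 'D' ∨ d = 'R' ∨ d = 'L') :
    pvDeltaA d ≠ (0, 0) := by
  rcases h with rfl | rfl | rfl | rfl <;> decide

theorem pvDelta_eta (d : Char) : pvDeltaA d = ((pvDeltaA d).1, (pvDeltaA d).2) := rfl

-- appending a point to a nonempty trajectory appends one canonical edge
theorem pvEdgesList_concat (p q : Int × Int) (l : List (Int × Int)) :
    pvEdgesList ((l ++ [p]) ++ [q]) = pvEdgesList (l ++ [p]) ++ [pvCanon p q] := by
  induction l with
  | nil => simp [pvEdgesList]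
  | cons a t ih =>
      cases t with
      | nil => simp [pvEdgesList]
      | cons b t' =>
          have hpeel : ∀ (u v : Int × Int) (l : List (Int × Int)),
              pvEdgesList (u :: v :: l) = pvCanon u v :: pvEdgesList (v :: l) := by
            intro u v l; simp [pvEdgesList]
          simp only [List.cons_append, List.append_assoc] at ih ⊢
          rw [hpeel, hpeel, ih]
          simp

-- one B-step of the trajectory list corresponds to one step of the edge set
theorem pvStepB_invB (sbl : List (Int × Int) × Int × Int)
    (sb : PySem.Set ((Int × Int) × (Int × Int)) × Int × Int) (c : Char)
    (h : pvInvB sbl sb) : pvInvB (pvStepB sbl c) (pvStepE sb c) := by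
  obtain ⟨pts, x, y⟩ := sbl
  obtain ⟨hlast, rfl⟩ := h
  simp only at hlast
  obtain ⟨l', hdecomp⟩ := List.getLast?_eq_some_iff.mp hlast
  simp only [pvStepB, pvStepE]
  split_ifs with hb
  · refine ⟨by simp, ?_⟩
    have : pvEdgesList (pts ++ [(x + (pvDeltaB c).1, y + (pvDeltaB c).2)]) =
        pvEdgesList pts ++ [pvCanon (x, y) (x + (pvDeltaB c).1, y + (pvDeltaB c).2)] := by
      conv_lhs => rw [hdecomp]
      conv_rhs => rw [hdecomp]
      exact pvEdgesList_concat _ _ _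
    rw [this, PySem.Set.ofList, PySem.Set.ofList, List.foldl_append]
    rfl
  · exact ⟨hlast, rfl⟩

theorem pv_mainB (l : List Char) (sbl : List (Int × Int) × Int × Int)
    (sb : PySem.Set ((Int × Int) × (Int × Int)) × Int × Int)
    (h : pvInvB sbl sb) : pvInvB (l.foldl pvStepB sbl) (l.foldl pvStepE sb) := by
  induction l generalizing sbl sb with
  | nil => exact h
  | cons c t ih => exact ih _ _ (pvStepB_invB sbl sb c h)

-- the core of the step-preservation argument (A vs edge set), abstracted over the direction
set_option maxHeartbeats 2000000 in
theorem pvStep_core (c copp : Char) (dx dy : Int)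
    (hc4 : c = 'U' ∨ c = 'D' ∨ c = 'R' ∨ c = 'L')
    (hd : pvDeltaA c = (dx, dy)) (hopp : pvOppA c = copp)
    (hdopp : pvDeltaA copp = (-dx, -dy))
    (hne : ¬(dx = 0 ∧ dy = 0))
    (hinjc : ∀ d, (d = 'U' ∨ d = 'D' ∨ d = 'R' ∨ d = 'L') → pvDeltaA d = (dx, dy) → d = c)
    (hinjo : ∀ d, (d = 'U' ∨ d = 'D' ∨ d = 'R' ∨ d = 'L') → pvDeltaA d = (-dx, -dy) → d = copp)
    (answer : Int) (walked : Int → Int → Char → Bool) (x y : Int)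
    (edges : PySem.Set ((Int × Int) × (Int × Int)))
    (hlen : answer = (edges.length : Int))
    (hw : ∀ (p : Int × Int) (d : Char), (d = 'U' ∨ d = 'D' ∨ d = 'R' ∨ d = 'L') →
      (walked p.1 p.2 d = true ↔
        pvCanon p (p.1 + (pvDeltaA d).1, p.2 + (pvDeltaA d).2) ∈ edges)) :
    pvInv (pvStepA (answer, walked, x, y) c) (pvStepE (edges, x, y) c) := by
  have hdB : pvDeltaB c = (dx, dy) := hd
  have hxy : ((x, y) : Int × Int) ≠ (x + dx, y + dy) := by
    simp only [ne_eq, Prod.mk.injEq]; omega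
  simp only [pvStepA, pvStepE, hd, hdB, hopp]
  split_ifs with hb hwk
  · -- in bounds, already walked: edge already present, set unchanged
    have hmem : walked x y c = true ↔ pvCanon (x, y) (x + dx, y + dy) ∈ edges := by
      have h := hw (x, y) c hc4
      rw [hd] at h
      exact h
    rw [PySem.Set.add_of_mem (hmem.mp hwk)]
    exact ⟨rfl, rfl, hlen, hw⟩
  · -- in bounds, new edge
    have hmem : walked x y c = true ↔ pvCanon (x, y) (x + dx, y + dy) ∈ edges := by
      have h := hw (x, y) c hc4
      rw [hd] at h
      exact h
    have hnm : pvCanon (x, y) (x + dx, y + dy) ∉ edges := fun hmm => hwk (hmem.mpr hmm)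
    rw [PySem.Set.add_of_not_mem hnm]
    refine ⟨rfl, rfl, ?_, ?_⟩
    · simp only [List.length_append, List.length_cons, List.length_nil]
      push_cast; omega
    · intro p d hd4
      have hkey : pvCanon p (p.1 + (pvDeltaA d).1, p.2 + (pvDeltaA d).2) =
          pvCanon (x, y) (x + dx, y + dy) ↔
          ((p.1 = x ∧ p.2 = y ∧ d = c) ∨ (p.1 = x + dx ∧ p.2 = y + dy ∧ d = copp)) := by
        constructor
        · intro h
          have hpne : p ≠ (p.1 + (pvDeltaA d).1, p.2 + (pvDeltaA d).2) := by
            have hdne := pvDelta_ne d hd4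
            obtain ⟨p1, p2⟩ := p
            simp only [ne_eq, Prod.mk.injEq, not_and] at hdne ⊢
            intro h1 h2
            apply hdne
            rw [pvDelta_eta d, Prod.mk.injEq]
            constructor <;> omega
          rcases (pvCanon_eq_iff _ _ _ _ hpne hxy).mp h with ⟨h1, h2⟩ | ⟨h1, h2⟩
          · left
            obtain ⟨p1, p2⟩ := p
            rw [Prod.ext_iff] at h1 h2
            simp only at h1 h2
            have hdd : pvDeltaA d = (dx, dy) := by
              rw [pvDelta_eta d, Prod.mk.injEq]
              constructor <;> omega
            exact ⟨h1.1, h1.2, hinjc d hd4 hdd⟩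
          · right
            obtain ⟨p1, p2⟩ := p
            rw [Prod.ext_iff] at h1 h2
            simp only at h1 h2
            have hdd : pvDeltaA d = (-dx, -dy) := by
              rw [pvDelta_eta d, Prod.mk.injEq]
              constructor <;> omega
            exact ⟨h1.1, h1.2, hinjo d hd4 hdd⟩
        · rintro (⟨h1, h2, rfl⟩ | ⟨h1, h2, rfl⟩)
          · obtain ⟨p1, p2⟩ := p
            simp only at h1 h2; subst h1; subst h2
            rw [hd]
          · obtain ⟨p1, p2⟩ := p
            simp only at h1 h2; subst h1; subst h2
            rw [hdopp]
            have heq : ((x + dx + -dx, y + dy + -dy) : Int × Int) = (x, y) := by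
              rw [Prod.mk.injEq]; constructor <;> omega
            rw [heq, pvCanon_comm]
      simp only [List.mem_append, List.mem_singleton, hkey]
      split_ifs with h2 h1
      · exact iff_of_true rfl (Or.inr (Or.inr h2))
      · exact iff_of_true rfl (Or.inr (Or.inl h1))
      · rw [hw p d hd4]
        constructor
        · exact fun hm => Or.inl hm
        · rintro (hm | hA | hB)
          · exact hm
          · exact absurd hA h1
          · exact absurd hB h2
  · exact ⟨rfl, rfl, hlen, hw⟩

-- step preserves the invariant
theorem pvStep_inv (sa : Int × (Int → Int → Char → Bool) × Int × Int)
    (sb : PySem.Set ((Int × Int) × (Int × Int)) × Int × Int)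
    (c : Char) (hc : c = 'U' ∨ c = 'D' ∨ c = 'R' ∨ c = 'L')
    (h : pvInv sa sb) : pvInv (pvStepA sa c) (pvStepE sb c) := by
  obtain ⟨answer, walked, x, y⟩ := sa
  obtain ⟨edges, x', y'⟩ := sb
  obtain ⟨hx, hy, hlen, hw⟩ := h
  simp only at hx hy hlen hw
  subst hx; subst hy
  rcases hc with rfl | rfl | rfl | rfl <;>
    refine pvStep_core _ _ _ _ (by decide) rfl rfl (by decide) (by decide)
      (fun d hd => by rcases hd with rfl | rfl | rfl | rfl <;> intro hq <;>
        first | rfl | (exfalso; rw [pvDeltaA] at hq; revert hq; decide))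
      (fun d hd => by rcases hd with rfl | rfl | rfl | rfl <;> intro hq <;>
        first | rfl | (exfalso; rw [pvDeltaA] at hq; revert hq; decide))
      answer walked x y edges hlen hw

-- main induction over the direction list
theorem pv_main (l : List Char) (hl : ∀ c ∈ l, c = 'U' ∨ c = 'D' ∨ c = 'R' ∨ c = 'L')
    (sa : Int × (Int → Int → Char → Bool) × Int × Int)
    (sb : PySem.Set ((Int × Int) × (Int × Int)) × Int × Int)
    (h : pvInv sa sb) : pvInv (l.foldl pvStepA sa) (l.foldl pvStepE sb) := by
  induction l generalizing sa sb with
  | nil => exact h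
  | cons c t ih =>
      exact ih (fun d hd => hl d (List.mem_cons_of_mem c hd)) _ _
        (pvStep_inv sa sb c (hl c List.mem_cons_self) h)

-- ===== VERDICT (by name: the statement is the Claim_ definition above) =====
theorem solution_spec : Claim_equal_solution := by
  intro dirs _ hpre
  have hpre' : ∀ c ∈ dirs.toList, c = 'U' ∨ c = 'D' ∨ c = 'R' ∨ c = 'L' := by
    unfold Pre_solution at hpre
    rw [List.all_eq_true] at hpre
    intro c hc
    have h4 := hpre c hc
    simp only [Bool.or_eq_true, beq_iff_eq] at h4
    tauto
  unfold Spec_solution solution solution_alt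
  have hA := pv_main dirs.toList hpre' (0, (fun _ _ _ => false), 5, 5)
    (PySem.Set.empty, 5, 5) (by
      refine ⟨rfl, rfl, rfl, ?_⟩
      intro p d _
      simp [PySem.Set.empty])
  have hB := pv_mainB dirs.toList ([(5, 5)], 5, 5) (PySem.Set.empty, 5, 5)
    ⟨rfl, by simp [pvEdgesList, PySem.Set.empty, PySem.Set.ofList]⟩
  obtain ⟨-, hBeq⟩ := hB
  rw [hBeq] at hA
  exact hA.2.2.1
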